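-- pv_equiv track=rewrite | github.com/ryanvbissell/derp-learning | palindromes/palindromes.py | intize
-- ===== SOURCE A (Python) =====
-- MAXPAL=40
--
-- def intize(text:str):
--     arr = []
--     length = len(text)
--     for offset in range(length,MAXPAL):  # pad out before intizing
--         text += '\0'
--     for i in range(MAXPAL):
--         value = ord(text[i])
--         arr.append(value)
--     return(arr)
-- ===== SOURCE B (Python) =====
-- MAXPAL = 40
--
-- def intize(text: str):
--     # Recursive decomposition: consume the character sequence while counting down
--     # the remaining slots; emit 0 once the characters run out.
--     return _go(list(text[:MAXPAL]), MAXPAL)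
--
-- def _go(chars, k):
--     if k == 0:
--         return []
--     if chars:
--         return [ord(chars[0])] + _go(chars[1:], k - 1)
--     return [0] + _go(chars, k - 1)
-- ===== Notes on version B (the rewrite author's own statement) =====
-- stated objective: alternative
-- what changed: A pads the input string with NULs and index-loops over all 40 positions with ord(); B is a structural recursion that consumes characters while counting down the 40 remaining slots, emitting 0 when characters run out, with no padding, no indexing and no mutable array.
import Mathlib
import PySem

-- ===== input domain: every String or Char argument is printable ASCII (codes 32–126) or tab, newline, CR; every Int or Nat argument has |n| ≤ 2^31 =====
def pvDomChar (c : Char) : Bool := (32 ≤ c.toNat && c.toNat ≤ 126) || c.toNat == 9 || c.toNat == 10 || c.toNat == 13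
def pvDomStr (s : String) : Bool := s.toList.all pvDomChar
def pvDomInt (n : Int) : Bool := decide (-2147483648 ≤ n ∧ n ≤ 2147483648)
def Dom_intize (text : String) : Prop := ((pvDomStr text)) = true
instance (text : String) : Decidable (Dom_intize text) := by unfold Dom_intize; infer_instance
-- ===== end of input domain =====

-- ===== PORT A =====
-- A: pad with '\0' up to 40 chars, then append ord of each of the first 40 positions.
-- range(MAXPAL) with literal nonnegative bounds is ported as List.range 40; text[i] with
-- 0 ≤ i < len(text) is exact as getD (the index is always in range after padding).
def intize (text : String) : List Int :=
  let cs := text.toList ++ List.replicate (40 - text.toList.length) (Char.ofNat 0)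
  (List.range 40).foldl (fun arr i => arr ++ [((cs.getD i (Char.ofNat 0)).toNat : Int)]) []

-- ===== PORT B =====
-- B: truncate to the 40 relevant characters (text[:MAXPAL] -> take 40), then a recursion
-- consuming characters while counting down the 40 remaining slots; emits 0 when exhausted.
def intizeGo : List Char → Nat → List Int
  | _, 0 => []
  | [], k + 1 => (0 : Int) :: intizeGo [] k
  | c :: cs, k + 1 => ((c.toNat : Int)) :: intizeGo cs k

def intize_alt (text : String) : List Int := intizeGo (text.toList.take 40) 40

-- ===== PRECONDITION & SPEC =====
def Spec_intize (text : String) (out : List Int) : Prop := out = intize_alt text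
instance (text : String) (out : List Int) : Decidable (Spec_intize text out) := by unfold Spec_intize; infer_instance

-- ===== CLAIM (what is proved, stated in full; the proofs are below) =====
def Claim_equal_intize : Prop := ∀ (text : String), Dom_intize text → Spec_intize text (intize text)

-- ===== LEMMAS AND PROOFS =====

-- canonical form both ports are reduced to
def intizeCanon (cs : List Char) (n : Nat) : List Int :=
  (cs.take n).map (fun c => (c.toNat : Int)) ++ List.replicate (n - cs.length) 0

theorem intizeGo_eq_canon (n : Nat) : ∀ (cs : List Char), intizeGo cs n = intizeCanon cs n := by
  induction n with
  | zero => intro cs; simp [intizeGo, intizeCanon]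
  | succ k ih =>
    intro cs
    cases cs with
    | nil => simp [intizeGo, intizeCanon, ih, List.replicate_succ]
    | cons c cs' =>
      simp [intizeGo, intizeCanon, ih cs', Nat.succ_sub_succ]

theorem foldl_app (f : Nat → Int) (l : List Nat) (acc : List Int) :
    l.foldl (fun a i => a ++ [f i]) acc = acc ++ l.map f := by
  induction l generalizing acc with
  | nil => simp
  | cons x xs ih => simp [List.foldl, ih]

-- ===== VERDICT (by name: the statement is the Claim_ definition above) =====
theorem intize_spec : Claim_equal_intize := by
  intro text _
  unfold Spec_intize intize intize_alt
  rw [intizeGo_eq_canon]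
  have hcan : ∀ ds : List Char, intizeCanon (ds.take 40) 40 = intizeCanon ds 40 := by
    intro ds; unfold intizeCanon
    simp only [List.take_take, Nat.min_self, List.length_take]
    congr 1; congr 1; omega
  rw [hcan]
  set cs := text.toList with hcs
  set n := cs.length with hn
  rw [foldl_app]
  simp only [List.nil_append]
  unfold intizeCanon
  apply List.ext_getElem
  · simp; omega
  · intro i h1 h2
    have hi : i < 40 := by
      simp only [List.length_map, List.length_range] at h1
      exact h1
    simp only [List.getElem_map, List.getElem_range]
    by_cases hin : i < n
    · have him : i < min n 40 := by omega
      rw [List.getElem_append_left (by simp; omega)]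
      simp only [List.getElem_map, List.getElem_take]
      have : (cs ++ List.replicate (40 - n) (Char.ofNat 0)).getD i (Char.ofNat 0)
           = cs.getD i (Char.ofNat 0) := by
        unfold List.getD
        rw [List.getElem?_append_left hin]
      rw [this]
      unfold List.getD
      rw [List.getElem?_eq_getElem hin]
      simp
    · rw [List.getElem_append_right (by simp; omega)]
      simp only [List.getElem_replicate]
      have hlt : i < (cs ++ List.replicate (40 - n) (Char.ofNat 0)).length := by
        simp; omega
      have : (cs ++ List.replicate (40 - n) (Char.ofNat 0)).getD i (Char.ofNat 0)
           = Char.ofNat 0 := by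
        unfold List.getD
        rw [List.getElem?_eq_getElem hlt,
          List.getElem_append_right (by omega)]
        simp
      rw [this]
      simp
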